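-- pv_equiv track=rewrite | github.com/ishaansathaye/daily-problems | CodeSignalArcade/TheCore/core_debugger.py | find_weakness
-- ===== SOURCE A (Python) =====
-- def find_weakness(x):
--     divisors_dict = find_divisors(x)
--     weakness = {}
--     for i in range(1, x+1):
--         weak_count = 0
--         for j in range(1, i+1):
--             if j < x and divisors_dict[str(j)] > divisors_dict[str(i)]:
--                 weak_count += 1
--         weakness[str(i)] = weak_count
--     return weakness
--
-- def find_divisors(n):
--     divisors = {}
--     for i in range(1, n+1):
--         count = 0
--         for j in range(1, i+1):
--             if i % j == 0:
--                 count += 1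
--         divisors[str(i)] = count
--     return divisors
-- ===== SOURCE B (Python) =====
-- def find_weakness(x):
--     # divisor counts 1..x by a multiples sieve instead of per-number trial division
--     d = [0] * (x + 1)
--     for i in range(1, x + 1):
--         for m in range(i, x + 1, i):
--             d[m] += 1
--     # one left-to-right pass: freq counts divisor-values seen so far (j < i);
--     # numbers j with d[j] > d[i] are summed from freq's distinct values
--     freq = {}
--     weakness = {}
--     for i in range(1, x + 1):
--         di = d[i]
--         weakness[str(i)] = sum(c for v, c in freq.items() if di < v)
--         freq[di] = freq.get(di, 0) + 1
--     return weakness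
-- ===== Notes on version B (the rewrite author's own statement) =====
-- stated objective: faster
-- what changed: Per-number trial-division divisor counting is replaced by a multiples sieve, and the quadratic rescan of all j <= i is replaced by one pass that keeps a frequency dict of divisor-counts seen so far and sums the counts of its (few) distinct values greater than d[i].
import Mathlib
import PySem

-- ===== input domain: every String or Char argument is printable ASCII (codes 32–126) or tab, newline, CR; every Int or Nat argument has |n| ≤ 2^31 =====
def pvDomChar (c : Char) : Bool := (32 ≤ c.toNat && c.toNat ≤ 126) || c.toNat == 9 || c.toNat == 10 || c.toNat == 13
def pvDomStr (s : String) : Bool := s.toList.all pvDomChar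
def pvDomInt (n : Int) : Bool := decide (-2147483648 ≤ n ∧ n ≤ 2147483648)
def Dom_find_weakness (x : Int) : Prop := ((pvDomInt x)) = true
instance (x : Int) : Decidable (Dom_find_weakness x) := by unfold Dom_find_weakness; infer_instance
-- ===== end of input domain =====

-- B replaces A's quadratic trial-division + rescan with a multiples sieve and a one-pass
-- frequency dict over divisor-count values (objective: faster; return value proved equal).


-- ===== PORT A =====
-- helper find_divisors: dict str(i) -> number of divisors of i, by trial division
def pvFindDivisors (n : Int) : PySem.Dict String Int :=
  (PySem.List.pyRange 1 (n+1) 1).foldl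
    (fun divisors i =>
      divisors.insert (PySem.Int.toStr i)
        ((PySem.List.pyRange 1 (i+1) 1).foldl
          (fun count j => if PySem.Int.mod i j = 0 then count + 1 else count) 0))
    PySem.Dict.empty

-- divisors_dict[str(j)] is ported as getD _ 0: the key str(j), 1 ≤ j ≤ x, is always present
def find_weakness (x : Int) : List (String × Int) :=
  -- divisors_dict = find_divisors(x)
  let divisors_dict := pvFindDivisors x
  ((PySem.List.pyRange 1 (x+1) 1).foldl
    (fun weakness i =>
      weakness.insert (PySem.Int.toStr i)
        ((PySem.List.pyRange 1 (i+1) 1).foldl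
          (fun weak_count j =>
            if j < x ∧ divisors_dict.getD (PySem.Int.toStr j) 0 > divisors_dict.getD (PySem.Int.toStr i) 0
            then weak_count + 1 else weak_count) 0))
    PySem.Dict.empty).items

-- ===== PORT B =====
def find_weakness_alt (x : Int) : List (String × Int) :=
  -- d = [0]*(x+1); sieve: for i: for m in range(i, x+1, i): d[m] += 1   (indices 1..x are in range)
  let d := (PySem.List.pyRange 1 (x+1) 1).foldl
    (fun d i => (PySem.List.pyRange i (x+1) i).foldl
        (fun d m => PySem.List.pySetD d m (PySem.List.pyGetD d m 0 + 1)) d)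
    (List.replicate (x+1).toNat (0:Int))
  -- one pass: freq = counter of d-values seen so far, weakness entry = Σ counts of values > d[i]
  ((PySem.List.pyRange 1 (x+1) 1).foldl
    (fun s i =>
      let di := PySem.List.pyGetD d i 0
      (s.1.insert di (s.1.getD di 0 + 1),
       s.2.insert (PySem.Int.toStr i)
         (s.1.items.foldl (fun acc p => if di < p.1 then acc + p.2 else acc) 0)))
    ((PySem.Dict.empty : PySem.Dict Int Int), (PySem.Dict.empty : PySem.Dict String Int))).2.items

-- ===== PRECONDITION & SPEC =====
def Spec_find_weakness (x : Int) (out : List (String × Int)) : Prop := out = find_weakness_alt x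
instance (x : Int) (out : List (String × Int)) : Decidable (Spec_find_weakness x out) := by unfold Spec_find_weakness; infer_instance

-- ===== CLAIM (what is proved, stated in full; the proofs are below) =====
def Claim_equal_find_weakness : Prop := ∀ (x : Int), Dom_find_weakness x → Spec_find_weakness x (find_weakness x)

-- ===== LEMMAS AND PROOFS =====

-- the trial-division divisor count of i (A's inner loop in find_divisors)
def pvTrialD (i : Int) : Int :=
  (PySem.List.pyRange 1 (i+1) 1).foldl
    (fun count j => if PySem.Int.mod i j = 0 then count + 1 else count) 0

-- B's sieve array
def pvSieve (x : Int) : List Int :=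
  (PySem.List.pyRange 1 (x+1) 1).foldl
    (fun d i => (PySem.List.pyRange i (x+1) i).foldl
        (fun d m => PySem.List.pySetD d m (PySem.List.pyGetD d m 0 + 1)) d)
    (List.replicate (x+1).toNat (0:Int))

def pvDv (x i : Int) : Int := PySem.List.pyGetD (pvSieve x) i 0

-- the common specification value: #{1 ≤ j < i with more divisors than i}
def pvW (i : Int) : Int :=
  ((PySem.List.pyRange 1 i 1).countP (fun j => decide (pvTrialD i < pvTrialD j)) : Int)

def pvSumGT (d : PySem.Dict Int Int) (t : Int) : Int :=
  d.items.foldl (fun acc p => if t < p.1 then acc + p.2 else acc) 0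

-- B's weakness value at i, as produced by the pass
def pvVB (x i : Int) : Int :=
  pvSumGT (PySem.Dict.counter ((PySem.List.pyRange 1 i 1).map (fun j => pvDv x j))) (pvDv x i)

-- ---- str(n) is injective on positive integers ----
lemma pv_digitChar_toNat (u : Nat) (hu : u < 10) : (Nat.digitChar u).toNat = 48 + u := by
  interval_cases u <;> rfl

lemma pv_map_digitChar_inj : ∀ (l1 l2 : List Nat), (∀ u ∈ l1, u < 10) → (∀ u ∈ l2, u < 10) →
    l1.map Nat.digitChar = l2.map Nat.digitChar → l1 = l2 := by
  intro l1
  induction l1 with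
  | nil => intro l2 _ _ h; cases l2 <;> simp_all
  | cons a l ih =>
    intro l2 h1 h2 h
    cases l2 with
    | nil => simp_all
    | cons b l2' =>
      simp only [List.map_cons, List.cons.injEq] at h
      have ha := h1 a (by simp)
      have hb := h2 b (by simp)
      have : (Nat.digitChar a).toNat = (Nat.digitChar b).toNat := by rw [h.1]
      rw [pv_digitChar_toNat a ha, pv_digitChar_toNat b hb] at this
      have hab : a = b := by omega
      have := ih l2' (fun u hu => h1 u (by simp [hu])) (fun u hu => h2 u (by simp [hu])) h.2
      simp [hab, this]

lemma pv_toDigitsCore_eq : ∀ (f n : Nat) (acc : List Char), 0 < n → n ≤ f →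
    Nat.toDigitsCore 10 f n acc = ((Nat.digits 10 n).map Nat.digitChar).reverse ++ acc := by
  intro f
  induction f with
  | zero => intro n acc h1 h2; omega
  | succ f ih =>
    intro n acc h1 h2
    rw [Nat.toDigitsCore]
    by_cases h : n / 10 = 0
    · simp only [h, if_true]
      rw [Nat.digits_def' (by norm_num : 1 < 10) h1, h, Nat.digits_zero]
      simp
    · simp only [h, if_false]
      have hd : 0 < n / 10 := Nat.pos_of_ne_zero h
      have hlt : n / 10 < n := Nat.div_lt_self h1 (by norm_num)
      rw [ih (n / 10) _ hd (by omega)]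
      rw [Nat.digits_def' (by norm_num : 1 < 10) h1]
      simp

lemma pv_toStr_inj_pos (a b : Int) (ha : 0 < a) (hb : 0 < b)
    (h : PySem.Int.toStr a = PySem.Int.toStr b) : a = b := by
  unfold PySem.Int.toStr PySem.Int.toChars at h
  rw [if_neg (by omega), if_neg (by omega)] at h
  have h' := String.ofList_inj.mp h
  unfold Nat.toDigits at h'
  rw [pv_toDigitsCore_eq _ _ _ (by omega) (by omega),
      pv_toDigitsCore_eq _ _ _ (by omega) (by omega)] at h'
  simp only [List.append_nil, List.reverse_inj] at h'
  have hd := pv_map_digitChar_inj _ _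
    (fun u hu => Nat.digits_lt_base (by norm_num) hu)
    (fun u hu => Nat.digits_lt_base (by norm_num) hu) h'
  have := Nat.digits_inj_iff.mp hd
  omega

-- ---- generic "+1 at every index of L" fold ----
lemma pv_incr_length (L : List Int) (d : List Int) :
    (L.foldl (fun d m => PySem.List.pySetD d m (PySem.List.pyGetD d m 0 + 1)) d).length = d.length := by
  induction L generalizing d with
  | nil => rfl
  | cons m L ih => simp [List.foldl_cons, ih, PySem.List.length_pySetD]

lemma pv_incr_getD (L : List Int) (d : List Int) (hN : L.Nodup)
    (hmem : ∀ m ∈ L, 0 ≤ m ∧ m < (d.length : Int)) (k : Int) (hk : 0 ≤ k) :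
    PySem.List.pyGetD (L.foldl (fun d m => PySem.List.pySetD d m (PySem.List.pyGetD d m 0 + 1)) d) k 0
      = PySem.List.pyGetD d k 0 + (if k ∈ L then 1 else 0) := by
  induction L generalizing d with
  | nil => simp
  | cons m L ih =>
    obtain ⟨hm0, hmlen⟩ := hmem m (by simp)
    have hmN : (m.toNat : Int) = m := Int.toNat_of_nonneg hm0
    have hkN : (k.toNat : Int) = k := Int.toNat_of_nonneg hk
    have hset : PySem.List.pyGetD (PySem.List.pySetD d m (PySem.List.pyGetD d m 0 + 1)) k 0
        = if k.toNat = m.toNat then PySem.List.pyGetD d m 0 + 1 else PySem.List.pyGetD d k 0 := by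
      rw [← hmN, ← hkN]
      exact PySem.List.pyGetD_pySetD_natCast d m.toNat k.toNat _ 0 (by omega)
    rw [List.foldl_cons, ih _ (List.nodup_cons.mp hN).2
      (fun m' hm' => by
        have := hmem m' (by simp [hm'])
        simpa [PySem.List.length_pySetD] using this), hset]
    by_cases hkm : k = m
    · subst hkm
      have : k ∉ L := (List.nodup_cons.mp hN).1
      simp [this]
    · have : k.toNat ≠ m.toNat := by omega
      simp [this, List.mem_cons, hkm]

-- Nodup of a positive-step range
lemma pv_nodup_pyRange_pos (a b s : Int) (hs : 0 < s) : (PySem.List.pyRange a b s).Nodup := by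
  rw [PySem.List.pyRange_of_pos a b hs]
  apply List.Nodup.map _ (List.nodup_range)
  intro u v huv
  simp only at huv
  have h2 : s * (u : Int) = s * v := by linarith
  have := mul_left_cancel₀ (ne_of_gt hs) h2
  exact_mod_cast this

-- ---- sieve correctness ----
lemma pv_sieve_fold_getD (x : Int) (L : List Int) (d : List Int)
    (hpos : ∀ i ∈ L, 0 < i) (hlen : (d.length : Int) = x + 1)
    (m : Int) (hm1 : 1 ≤ m) (hmx : m ≤ x) :
    PySem.List.pyGetD
      (L.foldl (fun d i => (PySem.List.pyRange i (x+1) i).foldl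
          (fun d m => PySem.List.pySetD d m (PySem.List.pyGetD d m 0 + 1)) d) d) m 0
      = PySem.List.pyGetD d m 0 + (L.countP (fun i => decide (i ∣ m)) : Int) := by
  induction L generalizing d with
  | nil => simp
  | cons i L ih =>
    have hi : 0 < i := hpos i (by simp)
    have hinner : PySem.List.pyGetD
        ((PySem.List.pyRange i (x+1) i).foldl
          (fun d m => PySem.List.pySetD d m (PySem.List.pyGetD d m 0 + 1)) d) m 0
        = PySem.List.pyGetD d m 0 + (if m ∈ PySem.List.pyRange i (x+1) i then 1 else 0) := by
      apply pv_incr_getD _ _ (pv_nodup_pyRange_pos i (x+1) i hi)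
      · intro m' hm'
        have := (PySem.List.mem_pyRange_iff_of_pos hi m').mp hm'
        constructor <;> omega
      · omega
    have hmem : (m ∈ PySem.List.pyRange i (x+1) i) ↔ i ∣ m := by
      rw [PySem.List.mem_pyRange_iff_of_pos hi m]
      constructor
      · rintro ⟨_, _, hd⟩
        have : i ∣ m - i + i := Dvd.dvd.add hd dvd_rfl
        simpa using this
      · intro hd
        refine ⟨Int.le_of_dvd (by omega) hd, by omega, ?_⟩
        exact Int.dvd_sub hd dvd_rfl
    rw [List.foldl_cons, ih _ (fun j hj => hpos j (by simp [hj]))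
      (by rw [pv_incr_length]; exact hlen), hinner, List.countP_cons]
    simp only [hmem]
    by_cases hd : i ∣ m
    · simp only [hd, decide_true, if_true]
      push_cast
      ring
    · simp [hd]

lemma pv_Dv_eq (x m : Int) (hm1 : 1 ≤ m) (hmx : m ≤ x) : pvDv x m = pvTrialD m := by
  have hx0 : 0 ≤ x + 1 := by omega
  have hrepl : PySem.List.pyGetD (List.replicate (x+1).toNat (0:Int)) m 0 = 0 := by
    rw [PySem.List.pyGetD_of_nonneg _ _ (by omega)]
    have h : m.toNat < (x+1).toNat := by omega
    simp [List.getD, h]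
  have hsieve : pvDv x m
      = 0 + ((PySem.List.pyRange 1 (x+1) 1).countP (fun i => decide (i ∣ m)) : Int) := by
    rw [← hrepl]
    apply pv_sieve_fold_getD x _ _ (fun i hi => by
        have := (PySem.List.mem_pyRange_one).mp hi; omega)
      (by simp [List.length_replicate]; omega) m hm1 hmx
  have htrial : pvTrialD m
      = ((PySem.List.pyRange 1 (m+1) 1).countP (fun j => decide (j ∣ m)) : Int) := by
    unfold pvTrialD
    rw [PySem.List.foldl_ite_add_one (fun j => PySem.Int.mod m j = 0)]
    rw [zero_add]
    congr 1
    apply List.countP_congr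
    intro j _
    simp [PySem.Int.mod_eq_zero_iff_dvd]
  have hsplit : PySem.List.pyRange 1 (x+1) 1
      = PySem.List.pyRange 1 (m+1) 1 ++ PySem.List.pyRange (m+1) (x+1) 1 :=
    PySem.List.pyRange_one_append 1 (m+1) (x+1) (by omega) (by omega)
  have hzero : (PySem.List.pyRange (m+1) (x+1) 1).countP (fun i => decide (i ∣ m)) = 0 := by
    apply List.countP_eq_zero.mpr
    intro i hi
    have hb := (PySem.List.mem_pyRange_one).mp hi
    simp only [decide_eq_true_eq]
    intro hd
    have := Int.le_of_dvd (by omega) hd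
    omega
  rw [hsieve, hsplit, List.countP_append, hzero, htrial]
  push_cast
  ring

-- ---- A's divisor dict ----
lemma pv_divisors_getD (x k : Int) (h1 : 1 ≤ k) (hk : k ≤ x) :
    (pvFindDivisors x).getD (PySem.Int.toStr k) 0 = pvTrialD k := by
  have hpos : ∀ i ∈ PySem.List.pyRange 1 (x+1) 1, 0 < i := fun i hi => by
    have := (PySem.List.mem_pyRange_one).mp hi; omega
  have hnodup : ((PySem.List.pyRange 1 (x+1) 1).map PySem.Int.toStr).Nodup := by
    apply List.Nodup.map_on
    · intro a ha b hb hab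
      exact pv_toStr_inj_pos a b (hpos a ha) (hpos b hb) hab
    · exact PySem.List.nodup_pyRange_one 1 (x+1)
  have hitems : (pvFindDivisors x).items
      = (PySem.List.pyRange 1 (x+1) 1).map (fun i => (PySem.Int.toStr i, pvTrialD i)) := by
    rw [show pvFindDivisors x = (PySem.List.pyRange 1 (x+1) 1).foldl
        (fun d i => d.insert (PySem.Int.toStr i) (pvTrialD i)) PySem.Dict.empty from rfl]
    rw [PySem.Dict.items_foldl_insert_fresh _ PySem.Int.toStr (fun i => pvTrialD i)
      PySem.Dict.empty (fun a _ => PySem.Dict.contains_empty _) hnodup]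
    simp [show (PySem.Dict.empty : PySem.Dict String Int).items = [] from rfl]
  have hkeys : (pvFindDivisors x).keys.Nodup := by
    unfold PySem.Dict.keys
    rw [hitems, List.map_map]
    exact hnodup
  apply PySem.Dict.getD_of_mem_items _ _ hkeys
  rw [hitems]
  exact List.mem_map.mpr ⟨k, PySem.List.mem_pyRange_one.mpr ⟨h1, by omega⟩, rfl⟩

-- A's inner weakness loop computes pvW
lemma pv_wA_eq (x i : Int) (h1 : 1 ≤ i) (h2 : i ≤ x) :
    (PySem.List.pyRange 1 (i+1) 1).foldl
      (fun weak_count j =>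
        if j < x ∧ (pvFindDivisors x).getD (PySem.Int.toStr j) 0 > (pvFindDivisors x).getD (PySem.Int.toStr i) 0
        then weak_count + 1 else weak_count) 0 = pvW i := by
  rw [PySem.List.foldl_ite_add_one
    (fun j => j < x ∧ (pvFindDivisors x).getD (PySem.Int.toStr j) 0 > (pvFindDivisors x).getD (PySem.Int.toStr i) 0)]
  rw [zero_add, PySem.List.pyRange_one_succ_right h1, List.countP_append]
  have hlast : List.countP
      (fun j => decide (j < x ∧ (pvFindDivisors x).getD (PySem.Int.toStr j) 0 > (pvFindDivisors x).getD (PySem.Int.toStr i) 0))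
      [i] = 0 := by
    simp
  rw [hlast]
  unfold pvW
  congr 1
  apply List.countP_congr
  intro j hj
  have hjb := (PySem.List.mem_pyRange_one).mp hj
  rw [pv_divisors_getD x j (by omega) (by omega), pv_divisors_getD x i h1 h2]
  simp only [decide_eq_true_eq, gt_iff_lt]
  constructor
  · rintro ⟨_, h⟩; exact h
  · intro h; exact ⟨by omega, h⟩

-- ---- counter sums ----
lemma pv_sum_indicator (S : List Int) (a : Int) (c : Int) (hS : S.Nodup) (ha : a ∈ S) :
    (S.map (fun v => if v = a then c else 0)).sum = c := by
  induction S with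
  | nil => cases ha
  | cons b S ih =>
    simp only [List.map_cons, List.sum_cons]
    rcases List.mem_cons.mp ha with h | h
    · subst h
      have hnb : a ∉ S := (List.nodup_cons.mp hS).1
      have hz : (S.map (fun v => if v = a then c else 0)).sum = 0 := by
        apply List.sum_eq_zero; intro y hy
        obtain ⟨v, hv, rfl⟩ := List.mem_map.mp hy
        simp only [ite_eq_right_iff]; intro he; exact absurd (he ▸ hv) hnb
      simp [hz]
    · have hba : b ≠ a := by rintro rfl; exact (List.nodup_cons.mp hS).1 h
      rw [ih (List.nodup_cons.mp hS).2 h]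
      simp [hba]

lemma pv_sum_count_gt (L : List Int) : ∀ (S : List Int), S.Nodup → (∀ v ∈ L, v ∈ S) → ∀ t : Int,
    (S.map (fun v => if t < v then (L.count v : Int) else 0)).sum
      = (L.countP (fun v => decide (t < v)) : Int) := by
  induction L with
  | nil =>
    intro S _ _ t
    simp only [List.count_nil, List.countP_nil, Nat.cast_zero]
    rw [List.sum_eq_zero (by intro y hy; obtain ⟨v, _, rfl⟩ := List.mem_map.mp hy; simp)]
  | cons a L ih =>
    intro S hS hsub t
    have ha : a ∈ S := hsub a (by simp)
    have hterm : ∀ v : Int,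
        (if t < v then ((a :: L).count v : Int) else 0)
        = (if t < v then (L.count v : Int) else 0) + (if v = a then (if t < a then (1:Int) else 0) else 0) := by
      intro v
      rw [List.count_cons]
      by_cases hv : v = a
      · subst hv
        by_cases ht : t < v <;> simp [ht]
      · have : (a == v) = false := by simp [Ne.symm hv]
        by_cases ht : t < v <;> simp [ht, hv, this]
    calc (S.map (fun v => if t < v then ((a :: L).count v : Int) else 0)).sum
        = (S.map (fun v => (if t < v then (L.count v : Int) else 0)
            + (if v = a then (if t < a then (1:Int) else 0) else 0))).sum := by
          congr 1; exact List.map_congr_left (fun v _ => hterm v)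
      _ = (S.map (fun v => if t < v then (L.count v : Int) else 0)).sum
            + (S.map (fun v => if v = a then (if t < a then (1:Int) else 0) else 0)).sum := by
          rw [PySem.List.sum_map_add_int]
      _ = (L.countP (fun v => decide (t < v)) : Int) + (if t < a then (1:Int) else 0) := by
          rw [ih S hS (fun v hv => hsub v (by simp [hv])) t,
            pv_sum_indicator S a _ hS ha]
      _ = ((a :: L).countP (fun v => decide (t < v)) : Int) := by
          rw [List.countP_cons]
          by_cases ht : t < a <;> simp [ht]

lemma pv_sumGT_counter (L : List Int) (t : Int) :
    pvSumGT (PySem.Dict.counter L) t = (L.countP (fun v => decide (t < v)) : Int) := by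
  unfold pvSumGT
  have hfun : (fun (acc : Int) (p : Int × Int) => if t < p.1 then acc + p.2 else acc)
      = (fun (acc : Int) (p : Int × Int) => acc + (if t < p.1 then p.2 else 0)) := by
    funext acc p
    by_cases h : t < p.1 <;> simp [h]
  rw [hfun, PySem.List.foldl_add, PySem.Dict.items_counter, List.map_map, zero_add]
  have : ((fun p : Int × Int => if t < p.1 then p.2 else 0) ∘ fun k => (k, (L.count k : Int)))
      = fun v => if t < v then (L.count v : Int) else 0 := rfl
  rw [this]
  exact pv_sum_count_gt L (PySem.Set.ofList L) (PySem.Set.nodup_ofList L)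
    (fun v hv => (PySem.Set.mem_ofList L v).mpr hv) t

-- ---- B's pass invariant ----
lemma pv_B_inv (x : Int) (n : Nat) (hn : (n : Int) ≤ x) :
    (PySem.List.pyRange 1 ((n:Int)+1) 1).foldl
      (fun s i =>
        let di := PySem.List.pyGetD (pvSieve x) i 0
        (s.1.insert di (s.1.getD di 0 + 1),
         s.2.insert (PySem.Int.toStr i)
           (s.1.items.foldl (fun acc p => if di < p.1 then acc + p.2 else acc) 0)))
      ((PySem.Dict.empty : PySem.Dict Int Int), (PySem.Dict.empty : PySem.Dict String Int))
    = (PySem.Dict.counter ((PySem.List.pyRange 1 ((n:Int)+1) 1).map (fun j => pvDv x j)),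
       (PySem.List.pyRange 1 ((n:Int)+1) 1).foldl
         (fun w i => w.insert (PySem.Int.toStr i) (pvVB x i)) PySem.Dict.empty) := by
  induction n with
  | zero =>
    rw [PySem.List.pyRange_one_eq_nil (by norm_num)]
    rfl
  | succ n ih =>
    have hn' : (n : Int) ≤ x := by push_cast at hn ⊢; omega
    have hsucc : PySem.List.pyRange 1 (((n+1 : Nat) : Int)+1) 1
        = PySem.List.pyRange 1 ((n:Int)+1) 1 ++ [(n:Int)+1] := by
      have := PySem.List.pyRange_one_succ_right (a := 1) (b := (n:Int)+1) (by omega)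
      push_cast
      push_cast at this
      exact this
    rw [hsucc, List.foldl_append, List.foldl_append, List.map_append, ih hn']
    simp only [List.foldl_cons, List.foldl_nil, List.map_cons, List.map_nil]
    refine Prod.ext ?_ rfl
    -- fst: counter extends
    show (PySem.Dict.counter ((PySem.List.pyRange 1 ((n:Int)+1) 1).map fun j => pvDv x j)).insert
          (PySem.List.pyGetD (pvSieve x) ((n:Int)+1) 0)
          ((PySem.Dict.counter ((PySem.List.pyRange 1 ((n:Int)+1) 1).map fun j => pvDv x j)).getD
            (PySem.List.pyGetD (pvSieve x) ((n:Int)+1) 0) 0 + 1)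
        = PySem.Dict.counter (((PySem.List.pyRange 1 ((n:Int)+1) 1).map fun j => pvDv x j) ++ [pvDv x ((n:Int)+1)])
    rw [← PySem.Dict.foldl_insert_getD_add_one_eq_counter,
        ← PySem.Dict.foldl_insert_getD_add_one_eq_counter, List.foldl_append]
    rfl

lemma pv_VB_eq (x i : Int) (h1 : 1 ≤ i) (h2 : i ≤ x) : pvVB x i = pvW i := by
  unfold pvVB
  rw [pv_sumGT_counter, List.countP_map]
  unfold pvW
  congr 1
  apply List.countP_congr
  intro j hj
  have hjb := (PySem.List.mem_pyRange_one).mp hj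
  simp only [Function.comp_apply, decide_eq_true_eq]
  rw [pv_Dv_eq x j (by omega) (by omega), pv_Dv_eq x i h1 h2]

-- ===== VERDICT (by name: the statement is the Claim_ definition above) =====
theorem find_weakness_spec : Claim_equal_find_weakness := by
  unfold Claim_equal_find_weakness Spec_find_weakness
  intro x _
  by_cases hx : x < 1
  · have hnil : PySem.List.pyRange 1 (x+1) 1 = [] :=
      PySem.List.pyRange_one_eq_nil (by omega)
    show find_weakness x = find_weakness_alt x
    unfold find_weakness find_weakness_alt
    rw [hnil]
    rfl
  · rw [not_lt] at hx
    obtain ⟨n, rfl⟩ : ∃ n : Nat, x = (n : Int) := ⟨x.toNat, by omega⟩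
    show find_weakness (n:Int) = find_weakness_alt (n:Int)
    have hA : find_weakness (n:Int)
        = ((PySem.List.pyRange 1 ((n:Int)+1) 1).foldl
            (fun w i => w.insert (PySem.Int.toStr i)
              ((PySem.List.pyRange 1 (i+1) 1).foldl
                (fun wc j => if j < (n:Int) ∧ (pvFindDivisors (n:Int)).getD (PySem.Int.toStr j) 0
                    > (pvFindDivisors (n:Int)).getD (PySem.Int.toStr i) 0
                  then wc + 1 else wc) 0))
            PySem.Dict.empty).items := rfl
    have hB : find_weakness_alt (n:Int)
        = ((PySem.List.pyRange 1 ((n:Int)+1) 1).foldl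
            (fun w i => w.insert (PySem.Int.toStr i) (pvVB (n:Int) i)) PySem.Dict.empty).items := by
      show ((PySem.List.pyRange 1 ((n:Int)+1) 1).foldl
          (fun s i =>
            let di := PySem.List.pyGetD (pvSieve (n:Int)) i 0
            (s.1.insert di (s.1.getD di 0 + 1),
             s.2.insert (PySem.Int.toStr i)
               (s.1.items.foldl (fun acc p => if di < p.1 then acc + p.2 else acc) 0)))
          ((PySem.Dict.empty : PySem.Dict Int Int), (PySem.Dict.empty : PySem.Dict String Int))).2.items = _
      rw [pv_B_inv (n:Int) n (by omega)]
    rw [hA, hB]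
    congr 1
    apply PySem.List.foldl_congr_mem
    intro acc i hi
    have hib := (PySem.List.mem_pyRange_one).mp hi
    rw [pv_wA_eq (n:Int) i (by omega) (by omega), pv_VB_eq (n:Int) i (by omega) (by omega)]
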